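-- pv_equiv track=rewrite | github.com/HWI813/daily-coding | day10.py | thr_add
-- ===== SOURCE A (Python) =====
-- from itertools import combinations
-- from itertools import combinations
--
-- def thr_add(nums,k):
--     add_list = set()
--     com = combinations(nums,3)
--     for comb in com:
--         add_list.add(sum(comb))
--     sorted_num = sorted(add_list, reverse=True)
--     if len(nums)<=2:
--         return -1
--     else:
--         return sorted_num[k-1]
-- ===== SOURCE B (Python) =====
-- def thr_add(nums, k):
--     if len(nums) <= 2:
--         return -1
--     pair_sums = set()    # distinct sums of pairs within the suffix processed so far
--     seen = []            # elements of the suffix processed so far (right to left)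
--     triple_sums = set()  # distinct sums of triples within that suffix
--     for x in reversed(nums):
--         for p in pair_sums:
--             triple_sums.add(x + p)
--         for y in seen:
--             pair_sums.add(x + y)
--         seen.append(x)
--     return sorted(triple_sums)[-k]
-- ===== Notes on version B (the rewrite author's own statement) =====
-- stated objective: alternative
-- what changed: B replaces the itertools.combinations enumeration plus descending sort with a right-to-left single pass that maintains the running set of distinct pair sums of the suffix (each new element is combined with the already-deduplicated pair sums), then sorts ascending once and indexes from the end with s[-k].
import Mathlib
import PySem

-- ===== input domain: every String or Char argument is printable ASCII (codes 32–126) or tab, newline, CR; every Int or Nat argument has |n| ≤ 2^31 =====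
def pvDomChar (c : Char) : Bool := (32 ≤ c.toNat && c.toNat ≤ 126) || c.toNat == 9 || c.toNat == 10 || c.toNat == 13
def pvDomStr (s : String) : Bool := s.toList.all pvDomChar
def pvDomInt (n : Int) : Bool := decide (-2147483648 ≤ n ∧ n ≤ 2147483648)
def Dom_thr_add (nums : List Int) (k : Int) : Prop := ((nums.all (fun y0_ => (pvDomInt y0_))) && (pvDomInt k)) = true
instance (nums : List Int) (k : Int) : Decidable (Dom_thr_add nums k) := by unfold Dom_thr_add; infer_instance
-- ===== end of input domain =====

-- B builds the distinct triple sums by one right-to-left pass over a running set of distinct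
-- pair sums (instead of enumerating itertools.combinations(nums,3)) and reads the answer from
-- the ascending sort with s[-k]; same return value on every input admitted by Pre_.

-- ===== PORT A =====
def thr_add (nums : List Int) (k : Int) : Int :=
  let add_list : PySem.Set Int :=
    (PySem.List.combinations nums 3).foldl (fun s comb => PySem.Set.add s comb.sum) PySem.Set.empty
  let sorted_num := PySem.List.sorted add_list (fun x => x) true
  if nums.length ≤ 2 then -1
  else PySem.List.pyGetD sorted_num (k - 1) 0

-- ===== PORT B =====
-- loop state: (pair_sums, seen, triple_sums)
def thrAddStep (st : PySem.Set Int × List Int × PySem.Set Int) (x : Int) :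
    PySem.Set Int × List Int × PySem.Set Int :=
  let triple_sums := PySem.Set.update st.2.2 (st.1.map (fun p => x + p))
  let pair_sums := PySem.Set.update st.1 (st.2.1.map (fun y => x + y))
  (pair_sums, st.2.1 ++ [x], triple_sums)

def thr_add_alt (nums : List Int) (k : Int) : Int :=
  if nums.length ≤ 2 then -1
  else
    let st := nums.reverse.foldl thrAddStep (PySem.Set.empty, [], PySem.Set.empty)
    PySem.List.pyGetD (PySem.List.sorted st.2.2 (fun x => x) false) (-k) 0

-- ===== PRECONDITION & SPEC =====
-- Pre_ excludes exactly the inputs where A raises IndexError (k-1 is not a valid Python index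
-- into the list of distinct triple sums); B raises IndexError on exactly the same inputs.
def Pre_thr_add (nums : List Int) (k : Int) : Prop :=
  nums.length ≤ 2 ∨
    PySem.Raise.InRange (PySem.List.dedup ((PySem.List.combinations nums 3).map List.sum)).length (k - 1)
instance (nums : List Int) (k : Int) : Decidable (Pre_thr_add nums k) := by
  unfold Pre_thr_add; infer_instance
def pvWitness_thr_add : List Int × Int := ([1, 2, 3, 4], 2)

def Spec_thr_add (nums : List Int) (k : Int) (out : Int) : Prop := out = thr_add_alt nums k
instance (nums : List Int) (k : Int) (out : Int) : Decidable (Spec_thr_add nums k out) := by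
  unfold Spec_thr_add; infer_instance

-- ===== CLAIM (what is proved, stated in full; the proofs are below) =====
def Claim_equal_thr_add : Prop :=
  ∀ (nums : List Int) (k : Int), Dom_thr_add nums k → Pre_thr_add nums k →
    Spec_thr_add nums k (thr_add nums k)

-- ===== LEMMAS AND PROOFS =====

theorem thrAddStep_fst (st : PySem.Set Int × List Int × PySem.Set Int) (x : Int) :
    (thrAddStep st x).1 = PySem.Set.update st.1 (st.2.1.map (fun y => x + y)) := rfl
theorem thrAddStep_seen (st : PySem.Set Int × List Int × PySem.Set Int) (x : Int) :
    (thrAddStep st x).2.1 = st.2.1 ++ [x] := rfl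
theorem thrAddStep_trd (st : PySem.Set Int × List Int × PySem.Set Int) (x : Int) :
    (thrAddStep st x).2.2 = PySem.Set.update st.2.2 (st.1.map (fun p => x + p)) := rfl

-- membership in the sums of (r+1)-combinations of x :: l
theorem mem_map_sum_combinations_cons {l : List Int} {x v : Int} {r : Nat} :
    v ∈ (PySem.List.combinations (x :: l) (r + 1)).map List.sum ↔
      (∃ c ∈ PySem.List.combinations l r, x + c.sum = v) ∨
        v ∈ (PySem.List.combinations l (r + 1)).map List.sum := by
  simp [PySem.List.combinations_cons_succ, List.map_append, Function.comp]

-- the loop invariant of B's single pass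
theorem thrAdd_loop_inv (l : List Int) :
    (l.foldr (fun x st => thrAddStep st x) (PySem.Set.empty, [], PySem.Set.empty)).2.1 = l.reverse ∧
    (l.foldr (fun x st => thrAddStep st x) (PySem.Set.empty, [], PySem.Set.empty)).1.Nodup ∧
    (∀ v, v ∈ (l.foldr (fun x st => thrAddStep st x) (PySem.Set.empty, [], PySem.Set.empty)).1 ↔
      v ∈ (PySem.List.combinations l 2).map List.sum) ∧
    (l.foldr (fun x st => thrAddStep st x) (PySem.Set.empty, [], PySem.Set.empty)).2.2.Nodup ∧
    (∀ v, v ∈ (l.foldr (fun x st => thrAddStep st x) (PySem.Set.empty, [], PySem.Set.empty)).2.2 ↔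
      v ∈ (PySem.List.combinations l 3).map List.sum) := by
  induction l with
  | nil =>
      refine ⟨rfl, List.nodup_nil, ?_, List.nodup_nil, ?_⟩ <;>
        intro v <;> simp [PySem.List.combinations, PySem.Set.empty]
  | cons x l ih =>
      obtain ⟨hseen, hpnd, hpmem, htnd, htmem⟩ := ih
      set st := l.foldr (fun x st => thrAddStep st x) (PySem.Set.empty, [], PySem.Set.empty) with hst
      refine ⟨?_, ?_, ?_, ?_, ?_⟩
      · rw [List.foldr_cons, thrAddStep_seen, hseen, List.reverse_cons]
      · rw [List.foldr_cons, thrAddStep_fst]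
        exact PySem.Set.nodup_update _ _ hpnd
      · intro v
        rw [List.foldr_cons, thrAddStep_fst, show (2 : Nat) = 1 + 1 from rfl,
          mem_map_sum_combinations_cons, PySem.Set.mem_update, hpmem v, hseen]
        constructor
        · rintro (h | h)
          · exact Or.inr h
          · obtain ⟨y, hy, rfl⟩ := List.mem_map.mp h
            rw [List.mem_reverse] at hy
            refine Or.inl ⟨[y], ?_, by simp⟩
            rw [PySem.List.combinations_one, List.mem_map]
            exact ⟨y, hy, rfl⟩
        · rintro (⟨c, hc, rfl⟩ | h)
          · rw [PySem.List.combinations_one, List.mem_map] at hc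
            obtain ⟨y, hy, rfl⟩ := hc
            refine Or.inr (List.mem_map.mpr ⟨y, List.mem_reverse.mpr hy, by simp⟩)
          · exact Or.inl h
      · rw [List.foldr_cons, thrAddStep_trd]
        exact PySem.Set.nodup_update _ _ htnd
      · intro v
        rw [List.foldr_cons, thrAddStep_trd, show (3 : Nat) = 2 + 1 from rfl,
          mem_map_sum_combinations_cons, PySem.Set.mem_update, htmem v]
        constructor
        · rintro (h | h)
          · exact Or.inr h
          · simp only [List.mem_map] at h
            obtain ⟨p, hp, rfl⟩ := h
            rw [hpmem p] at hp
            simp only [List.mem_map] at hp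
            obtain ⟨c, hc, rfl⟩ := hp
            exact Or.inl ⟨c, hc, rfl⟩
        · rintro (⟨c, hc, rfl⟩ | h)
          · refine Or.inr ?_
            simp only [List.mem_map]
            exact ⟨c.sum, (hpmem c.sum).mpr (List.mem_map_of_mem hc), rfl⟩
          · exact Or.inl h

-- reading a reversed list at Python index k-1 = reading the list at Python index -k
theorem pyGetD_reverse_shift (xs : List Int) (k : Int)
    (h : PySem.Raise.InRange xs.length (k - 1)) :
    PySem.List.pyGetD xs.reverse (k - 1) 0 = PySem.List.pyGetD xs (-k) 0 := by
  have hr : (-(xs.length : Int)) ≤ k - 1 ∧ k - 1 < xs.length := by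
    simpa [PySem.Raise.InRange] using h
  obtain ⟨hr1, hr2⟩ := hr
  by_cases hk : 1 ≤ k
  · rw [PySem.List.pyGetD_eq_getElem xs.reverse (i := k - 1) 0 (by omega)
      (by rw [List.length_reverse]; omega)]
    rw [show -k = -((k.toNat : Nat) : Int) by omega,
      PySem.List.pyGetD_neg_natCast xs k.toNat 0 (by omega) (by omega)]
    rw [List.getElem_reverse]
    congr 1
    omega
  · rw [show k - 1 = -(((1 - k).toNat : Nat) : Int) by omega,
      PySem.List.pyGetD_neg_natCast xs.reverse (1 - k).toNat 0 (by omega)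
      (by rw [List.length_reverse]; omega)]
    rw [PySem.List.pyGetD_eq_getElem xs (i := -k) 0 (by omega) (by omega)]
    rw [List.getElem_reverse]
    congr 1
    rw [List.length_reverse]
    omega

-- ===== VERDICT (by name: the statement is the Claim_ definition above) =====
theorem thr_add_spec : Claim_equal_thr_add := by
  intro nums k _ hpre
  unfold Spec_thr_add thr_add thr_add_alt
  by_cases hlen : nums.length ≤ 2
  · simp [hlen]
  · simp only [hlen, if_false]
    set L := (PySem.List.combinations nums 3).map List.sum with hL
    have hfold : (PySem.List.combinations nums 3).foldl (fun s comb => PySem.Set.add s comb.sum)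
        PySem.Set.empty = PySem.Set.ofList L := by
      rw [PySem.Set.ofList_eq_foldl, hL, List.foldl_map]
      rfl
    rw [hfold, List.foldl_reverse]
    obtain ⟨-, -, -, htnd, htmem⟩ := thrAdd_loop_inv nums
    set T := (nums.foldr (fun x st => thrAddStep st x)
      (PySem.Set.empty, [], PySem.Set.empty)).2.2 with hT
    have hperm : T.Perm (PySem.Set.ofList L) := by
      rw [List.perm_ext_iff_of_nodup htnd (PySem.Set.nodup_ofList L)]
      intro v
      rw [htmem v, PySem.Set.mem_ofList]
    set asc := PySem.List.sorted T (fun x => x) false with hasc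
    have hascnd : asc.Nodup := (PySem.List.sorted_perm T (fun x => x) false).nodup_iff.mpr htnd
    have hasclt : asc.Pairwise (· < ·) := by
      have hle : asc.Pairwise (fun a b => a ≤ b) := PySem.List.sorted_pairwise T (fun x => x)
      exact (hle.and hascnd).imp (fun h => lt_of_le_of_ne h.1 h.2)
    have hdesc : PySem.List.sorted (PySem.Set.ofList L) (fun x => x) true = asc.reverse := by
      apply PySem.List.sorted_rev_eq_of_perm_of_pairwise_gt
      · exact (asc.reverse_perm.trans (PySem.List.sorted_perm T (fun x => x) false)).trans hperm
      · rw [List.pairwise_reverse]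
        simpa using hasclt
    rw [hdesc]
    have hlenT : asc.length = (PySem.List.dedup L).length := by
      rw [PySem.List.dedup_eq_ofList]
      exact (PySem.List.sorted_perm T (fun x => x) false).length_eq.trans hperm.length_eq
    have hin : PySem.Raise.InRange asc.length (k - 1) := by
      rcases hpre with h | h
      · omega
      · rw [hlenT]; exact h
    exact pyGetD_reverse_shift asc k hin
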